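-- pv_equiv track=rewrite | github.com/AleVlaKon/algorytm | 10/10.3.7.py | card_game_results
-- ===== SOURCE A (Python) =====
-- from itertools import cycle
--
-- def card_game_results(nums: list[int]):
--     left = 0
--     right = len(nums) - 1
--
--     res = {'Timur': 0, "Artur": 0}
--     choise = cycle(["Timur", "Artur"])
--
--     while left <= right:
--         if nums[left] > nums[right]:
--             res[next(choise)] += nums[left]
--             left += 1
--         else:
--             res[next(choise)] += nums[right]
--             right -= 1
--
--     return res["Timur"], res["Artur"]
-- ===== SOURCE B (Python) =====
-- def card_game_results(nums: list[int]):
--     # Simulate with two forward cursors: one into nums, one into its reversal;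
--     # record the picked cards in order, then score by parity of the pick index.
--     fwd = nums
--     bwd = nums[::-1]
--     n = len(nums)
--     i = j = 0
--     picks = []
--     while i + j < n:
--         if fwd[i] > bwd[j]:
--             picks.append(fwd[i])
--             i += 1
--         else:
--             picks.append(bwd[j])
--             j += 1
--     return sum(picks[0::2]), sum(picks[1::2])
-- ===== Notes on version B (the rewrite author's own statement) =====
-- stated objective: alternative
-- what changed: Replaces A's dict + itertools.cycle interleaved accumulation with a simulation over two forward cursors (into nums and its reversal) that records the ordered pick list, then scores Timur/Artur afterwards by parity slices picks[0::2]/picks[1::2].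
import Mathlib
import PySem

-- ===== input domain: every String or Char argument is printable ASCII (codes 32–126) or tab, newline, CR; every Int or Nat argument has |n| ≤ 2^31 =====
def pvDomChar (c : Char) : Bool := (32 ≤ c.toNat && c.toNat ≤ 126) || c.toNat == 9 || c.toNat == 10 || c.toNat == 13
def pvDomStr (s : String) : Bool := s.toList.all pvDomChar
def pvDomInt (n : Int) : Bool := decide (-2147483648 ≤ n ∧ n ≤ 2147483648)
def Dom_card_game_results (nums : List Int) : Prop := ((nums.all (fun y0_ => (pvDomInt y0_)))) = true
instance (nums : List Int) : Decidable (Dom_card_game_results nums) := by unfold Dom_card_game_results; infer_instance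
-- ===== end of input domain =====

-- B replaces A's dict+cycle interleaved accumulation by a pick-list simulation over two
-- forward cursors (into nums and its reversal) scored afterwards by parity slices (alternative).

-- ===== PORT A =====
-- A's while loop; indices left/right always stay in range while left ≤ right, so pyGetD's
-- default 0 is never consulted.  fuel = nums.length + 1 bounds the loop's exact n iterations.
def cgA (nums : List Int) : Nat → Int → Int → Int → Int → Bool → Int × Int
  | 0, _, _, t, a, _ => (t, a)
  | fuel+1, left, right, t, a, turn =>
    if left ≤ right then
      if PySem.List.pyGetD nums left 0 > PySem.List.pyGetD nums right 0 then
        if turn then cgA nums fuel (left+1) right (t + PySem.List.pyGetD nums left 0) a false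
                else cgA nums fuel (left+1) right t (a + PySem.List.pyGetD nums left 0) true
      else
        if turn then cgA nums fuel left (right-1) (t + PySem.List.pyGetD nums right 0) a false
                else cgA nums fuel left (right-1) t (a + PySem.List.pyGetD nums right 0) true
    else (t, a)

def card_game_results (nums : List Int) : Int × Int :=
  cgA nums (nums.length + 1) 0 ((nums.length : Int) - 1) 0 0 true

-- ===== PORT B =====
-- B's while loop: cursors i into fwd and j into bwd = reversed nums, guard i + j < n.
def cgPicks (fwd bwd : List Int) (n : Int) : Nat → Int → Int → List Int
  | 0, _, _ => []
  | fuel+1, i, j =>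
    if i + j < n then
      if PySem.List.pyGetD fwd i 0 > PySem.List.pyGetD bwd j 0 then
        PySem.List.pyGetD fwd i 0 :: cgPicks fwd bwd n fuel (i+1) j
      else
        PySem.List.pyGetD bwd j 0 :: cgPicks fwd bwd n fuel i (j+1)
    else []

-- (sum picks[0::2], sum picks[1::2]); PySem has no step-2 slice, so this is an exact hand port.
def sumAlt : List Int → Int × Int
  | [] => (0, 0)
  | x :: xs => (x + (sumAlt xs).2, (sumAlt xs).1)

def card_game_results_alt (nums : List Int) : Int × Int :=
  -- nums[::-1] ported as List.reverse
  sumAlt (cgPicks nums nums.reverse (nums.length : Int) (nums.length + 1) 0 0)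

-- ===== PRECONDITION & SPEC =====
def Spec_card_game_results (nums : List Int) (out : Int × Int) : Prop := out = card_game_results_alt nums
instance (nums : List Int) (out : Int × Int) : Decidable (Spec_card_game_results nums out) := by unfold Spec_card_game_results; infer_instance

-- ===== CLAIM (what is proved, stated in full; the proofs are below) =====
def Claim_equal_card_game_results : Prop := ∀ (nums : List Int), Dom_card_game_results nums → Spec_card_game_results nums (card_game_results nums)

-- ===== LEMMAS AND PROOFS =====

lemma cg_key (nums : List Int) : ∀ (fuel : Nat) (l r t a : Int) (turn : Bool),
    0 ≤ l → r < (nums.length : Int) →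
    cgA nums fuel l r t a turn =
      (let p := cgPicks nums nums.reverse (nums.length : Int) fuel l ((nums.length : Int) - 1 - r)
       if turn then (t + (sumAlt p).1, a + (sumAlt p).2)
               else (t + (sumAlt p).2, a + (sumAlt p).1)) := by
  intro fuel
  induction fuel with
  | zero =>
    intro l r t a turn _ _
    cases turn <;> simp [cgA, cgPicks, sumAlt]
  | succ fuel ih =>
    intro l r t a turn hl hr
    have hguard : (l ≤ r) ↔ (l + ((nums.length : Int) - 1 - r) < (nums.length : Int)) := by omega
    by_cases hlr : l ≤ r
    · have hb : PySem.List.pyGetD nums.reverse ((nums.length : Int) - 1 - r) 0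
              = PySem.List.pyGetD nums r 0 := by
        rw [PySem.List.pyGetD_eq_getElem nums.reverse 0 (by omega)
              (by rw [List.length_reverse]; omega),
            PySem.List.pyGetD_eq_getElem nums 0 (by omega) (by omega)]
        rw [List.getElem_reverse]
        congr 1
        omega
      rw [cgA, cgPicks]
      rw [if_pos hlr, if_pos (hguard.mp hlr), hb]
      by_cases hc : PySem.List.pyGetD nums l 0 > PySem.List.pyGetD nums r 0
      · rw [if_pos hc, if_pos hc]
        cases turn
        · rw [ih (l+1) r t (a + PySem.List.pyGetD nums l 0) true (by omega) hr]
          simp only [sumAlt]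
          simp only [Bool.false_eq_true, if_false, if_true, add_assoc]
        · rw [ih (l+1) r (t + PySem.List.pyGetD nums l 0) a false (by omega) hr]
          simp only [sumAlt]
          simp only [Bool.false_eq_true, if_false, if_true, add_assoc]
      · rw [if_neg hc, if_neg hc]
        have hj : (nums.length : Int) - 1 - r + 1 = (nums.length : Int) - 1 - (r - 1) := by ring
        cases turn
        · rw [ih l (r-1) t (a + PySem.List.pyGetD nums r 0) true hl (by omega), hj]
          simp only [sumAlt]
          simp only [Bool.false_eq_true, if_false, if_true, add_assoc]
        · rw [ih l (r-1) (t + PySem.List.pyGetD nums r 0) a false hl (by omega), hj]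
          simp only [sumAlt]
          simp only [Bool.false_eq_true, if_false, if_true, add_assoc]
    · rw [cgA, cgPicks]
      rw [if_neg hlr, if_neg (fun h => hlr (hguard.mpr h))]
      cases turn <;> simp [sumAlt]

-- ===== VERDICT (by name: the statement is the Claim_ definition above) =====
theorem card_game_results_spec : Claim_equal_card_game_results := by
  intro nums _
  unfold Spec_card_game_results card_game_results card_game_results_alt
  rw [cg_key nums (nums.length + 1) 0 ((nums.length : Int) - 1) 0 0 true (by omega) (by omega)]
  simp
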